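-- pv_equiv track=rewrite | github.com/NENUBioCompute/TMP-ResDistancePre | TMP-SurResD/processing.py | get_feature_label
-- ===== SOURCE A (Python) =====
-- def get_feature_label(ID, flag):
--     onehot = []
--     hhm = []
--     ccmpred = []
--     feature = []
--     label = []
--     label_dir = "./dataset/test/lable/"
--     # get lable path
--     for item in ID:
--         label.append(label_dir + item + '.npy')
--
--     if flag == 'ccmpred':
--         ccmpred_dir = "./dataset/test/ccmpred/"
--         for item in ID:
--             ccmpred.append(ccmpred_dir + item + '.mat')
--
--         feature.append(ccmpred)
--         return feature, label
--
--
--     if flag == 'hhm+ccmpred':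
--         hhm_dir = "./dataset/test/hhm/"
--         ccmpred_dir = "./dataset/test/ccmpred/"
--         for item in ID:
--             hhm.append(hhm_dir + item + '.npy')
--             ccmpred.append(ccmpred_dir + item + '.mat')
--
--         feature.append(hhm)
--         feature.append(ccmpred)
--
--         return feature, label
--
--
--     elif flag == 'onehot+hhm+ccmpred':
--         onehot_dir = "./dataset/test/onehot/"
--         hhm_dir = "./dataset/test/hhm/"
--         ccmpred_dir = "./dataset/test/ccmpred/"
--         for item in ID:
--             onehot.append(onehot_dir + item + '.npy')
--             hhm.append(hhm_dir + item + '.npy')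
--             ccmpred.append(ccmpred_dir + item + '.mat')
--
--         feature.append(onehot)
--         feature.append(hhm)
--         feature.append(ccmpred)
--
--         return feature, label
-- ===== SOURCE B (Python) =====
-- _LABEL_DIR = "./dataset/test/lable/"
-- _SPEC = {
--     'ccmpred': [("./dataset/test/ccmpred/", ".mat")],
--     'hhm+ccmpred': [("./dataset/test/hhm/", ".npy"),
--                     ("./dataset/test/ccmpred/", ".mat")],
--     'onehot+hhm+ccmpred': [("./dataset/test/onehot/", ".npy"),
--                            ("./dataset/test/hhm/", ".npy"),
--                            ("./dataset/test/ccmpred/", ".mat")],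
-- }
--
-- def get_feature_label(ID, flag):
--     spec = _SPEC.get(flag)
--     if spec is None:
--         return None
--     feature = [[d + item + e for item in ID] for (d, e) in spec]
--     label = [_LABEL_DIR + item + ".npy" for item in ID]
--     return feature, label
-- ===== Notes on version B (the rewrite author's own statement) =====
-- stated objective: simpler
-- what changed: Replaces the three branch-specific accumulation loops (plus an always-built label loop) with a single table of (directory, extension) pairs looked up by flag and two comprehensions; the unknown-flag fall-through becomes an explicit None on missing key. (list comprehensions avoid A's per-item list appends, a constant-factor win).
import Mathlib
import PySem

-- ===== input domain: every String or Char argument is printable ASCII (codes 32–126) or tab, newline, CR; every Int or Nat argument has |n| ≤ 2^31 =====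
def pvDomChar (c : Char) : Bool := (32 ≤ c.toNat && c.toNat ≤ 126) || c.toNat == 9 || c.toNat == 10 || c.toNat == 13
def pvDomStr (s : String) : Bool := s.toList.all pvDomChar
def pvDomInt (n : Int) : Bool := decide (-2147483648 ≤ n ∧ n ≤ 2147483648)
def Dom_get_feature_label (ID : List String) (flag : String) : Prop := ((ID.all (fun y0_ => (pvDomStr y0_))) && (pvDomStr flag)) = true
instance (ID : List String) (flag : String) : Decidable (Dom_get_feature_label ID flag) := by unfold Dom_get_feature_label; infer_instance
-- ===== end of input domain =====

-- B replaces A's branch-specific accumulation loops by a flag-indexed table of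
-- (directory, extension) pairs and comprehensions; same return value everywhere.

-- ===== PORT A =====
def get_feature_label (ID : List String) (flag : String) : Option (List (List String) × List String) :=
  let label := ID.foldl (fun acc item => acc ++ ["./dataset/test/lable/" ++ item ++ ".npy"]) []
  if flag == "ccmpred" then
    let ccmpred := ID.foldl (fun acc item => acc ++ ["./dataset/test/ccmpred/" ++ item ++ ".mat"]) []
    some ([] ++ [ccmpred], label)
  else if flag == "hhm+ccmpred" then
    let st := ID.foldl (fun (p : List String × List String) item =>
        (p.1 ++ ["./dataset/test/hhm/" ++ item ++ ".npy"],
         p.2 ++ ["./dataset/test/ccmpred/" ++ item ++ ".mat"])) ([], [])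
    some ([] ++ [st.1] ++ [st.2], label)
  else if flag == "onehot+hhm+ccmpred" then
    let st := ID.foldl (fun (p : List String × List String × List String) item =>
        (p.1 ++ ["./dataset/test/onehot/" ++ item ++ ".npy"],
         p.2.1 ++ ["./dataset/test/hhm/" ++ item ++ ".npy"],
         p.2.2 ++ ["./dataset/test/ccmpred/" ++ item ++ ".mat"])) ([], [], [])
    some ([] ++ [st.1] ++ [st.2.1] ++ [st.2.2], label)
  else
    none

-- ===== PORT B =====
def gflTable : PySem.Dict String (List (String × String)) :=
  PySem.Dict.ofList
    [("ccmpred", [("./dataset/test/ccmpred/", ".mat")]),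
     ("hhm+ccmpred", [("./dataset/test/hhm/", ".npy"), ("./dataset/test/ccmpred/", ".mat")]),
     ("onehot+hhm+ccmpred", [("./dataset/test/onehot/", ".npy"), ("./dataset/test/hhm/", ".npy"),
                             ("./dataset/test/ccmpred/", ".mat")])]

def get_feature_label_alt (ID : List String) (flag : String) : Option (List (List String) × List String) :=
  match gflTable.get? flag with
  | none => none
  | some spec =>
      some (spec.map (fun de => ID.map (fun item => de.1 ++ item ++ de.2)),
            ID.map (fun item => "./dataset/test/lable/" ++ item ++ ".npy"))

-- ===== PRECONDITION & SPEC =====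
def Spec_get_feature_label (ID : List String) (flag : String) (out : Option (List (List String) × List String)) : Prop := out = get_feature_label_alt ID flag
instance (ID : List String) (flag : String) (out : Option (List (List String) × List String)) : Decidable (Spec_get_feature_label ID flag out) := by unfold Spec_get_feature_label; infer_instance

-- ===== CLAIM (what is proved, stated in full; the proofs are below) =====
def Claim_equal_get_feature_label : Prop := ∀ (ID : List String) (flag : String), Dom_get_feature_label ID flag → Spec_get_feature_label ID flag (get_feature_label ID flag)

-- ===== LEMMAS AND PROOFS =====
theorem gfl_foldl_map (f : String → String) (ID : List String) (acc : List String) :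
    ID.foldl (fun acc item => acc ++ [f item]) acc = acc ++ ID.map f := by
  induction ID generalizing acc with
  | nil => simp
  | cons x xs ih => simp [List.foldl, ih]

theorem gfl_foldl_map2 (f g : String → String) (ID : List String) (a b : List String) :
    ID.foldl (fun (p : List String × List String) item =>
        (p.1 ++ [f item], p.2 ++ [g item])) (a, b) = (a ++ ID.map f, b ++ ID.map g) := by
  induction ID generalizing a b with
  | nil => simp
  | cons x xs ih => simp [List.foldl, ih]

theorem gfl_foldl_map3 (f g h : String → String) (ID : List String) (a b c : List String) :
    ID.foldl (fun (p : List String × List String × List String) item =>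
        (p.1 ++ [f item], p.2.1 ++ [g item], p.2.2 ++ [h item])) (a, b, c) =
      (a ++ ID.map f, b ++ ID.map g, c ++ ID.map h) := by
  induction ID generalizing a b c with
  | nil => simp
  | cons x xs ih => simp [List.foldl, ih]

theorem gflTable_eq : gflTable = PySem.Dict.mk
    [("ccmpred", [("./dataset/test/ccmpred/", ".mat")]),
     ("hhm+ccmpred", [("./dataset/test/hhm/", ".npy"), ("./dataset/test/ccmpred/", ".mat")]),
     ("onehot+hhm+ccmpred", [("./dataset/test/onehot/", ".npy"), ("./dataset/test/hhm/", ".npy"),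
                             ("./dataset/test/ccmpred/", ".mat")])] := by
  decide

theorem gflTable_get? (flag : String) : gflTable.get? flag =
    if "ccmpred" == flag then some [("./dataset/test/ccmpred/", ".mat")]
    else if "hhm+ccmpred" == flag then some [("./dataset/test/hhm/", ".npy"), ("./dataset/test/ccmpred/", ".mat")]
    else if "onehot+hhm+ccmpred" == flag then some [("./dataset/test/onehot/", ".npy"), ("./dataset/test/hhm/", ".npy"), ("./dataset/test/ccmpred/", ".mat")]
    else none := by
  rw [gflTable_eq]
  simp only [PySem.Dict.get?]
  by_cases h1 : "ccmpred" = flag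
  · simp [← h1]
  · by_cases h2 : "hhm+ccmpred" = flag
    · simp [← h2]
    · by_cases h3 : "onehot+hhm+ccmpred" = flag
      · simp [← h3]
      · simp [List.find?, beq_eq_false_iff_ne.mpr h1, beq_eq_false_iff_ne.mpr h2,
              beq_eq_false_iff_ne.mpr h3, h1, h2, h3]

-- ===== VERDICT (by name: the statement is the Claim_ definition above) =====
theorem get_feature_label_spec : Claim_equal_get_feature_label := by
  intro ID flag _
  unfold Spec_get_feature_label get_feature_label get_feature_label_alt
  rw [gflTable_get?]
  by_cases h1 : flag = "ccmpred"
  · subst h1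
    simp only [gfl_foldl_map]
    simp
  · by_cases h2 : flag = "hhm+ccmpred"
    · subst h2
      simp only [gfl_foldl_map, gfl_foldl_map2]
      simp
    · by_cases h3 : flag = "onehot+hhm+ccmpred"
      · subst h3
        simp only [gfl_foldl_map, gfl_foldl_map3]
        simp
      · simp [h1, h2, h3, Ne.symm h1, Ne.symm h2, Ne.symm h3, beq_iff_eq]
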